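-- pv_equiv track=rewrite | github.com/jaedotcom/ComputerVisionBarcodeDetection | _barcode_detection.py | findBorder
-- ===== SOURCE A (Python) =====
-- def getKey(val, dict_):
--     for key, value in dict_.items():
--         if val == value:
--             return key
--
-- def findBorder(group_array, dict_, image_height, image_width):
--     big_num = None
--     min_x, max_x, min_y, max_y = None, None, None, None
--
--     for key in dict_:
--         if big_num == None:
--             big_num = dict_[key]
--         if dict_[key] > big_num:
--             big_num = dict_[key]
--
--     big_group = getKey(big_num, dict_)
--
--     for y in range(image_height):
--         for x in range(image_width):
--             if group_array[y][x] == big_group: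
--                 if min_x == None:
--                     min_x, max_x, min_y, max_y = x,x,y,y
--                 if y > max_y:
--                     max_y = y
--                 if y < min_y:
--                     min_y = y
--                 if x > max_x:
--                     max_x = x
--                 if x < min_x:
--                     min_x = x
--
--     return [min_x,max_x,min_y,max_y]
-- ===== SOURCE B (Python) =====
-- def findBorder(group_array, dict_, image_height, image_width):
--     # argmax over items: first key with the maximal count (Python max keeps the first maximum)
--     big_group = max(dict_.items(), key=lambda kv: kv[1])[0] if dict_ else None
--
--     min_x = max_x = min_y = max_y = None
--     for y in range(image_height):
--         # first matching column in this row, if any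
--         lo = next((x for x in range(image_width) if group_array[y][x] == big_group), None)
--         if lo is None:
--             continue
--         # last matching column: first match scanning right-to-left
--         hi = next((x for x in range(image_width - 1, -1, -1) if group_array[y][x] == big_group), lo)
--         if min_y is None:
--             min_y = y
--         max_y = y
--         if min_x is None or lo < min_x:
--             min_x = lo
--         if max_x is None or hi > max_x:
--             max_x = hi
--     return [min_x, max_x, min_y, max_y]
-- ===== Notes on version B (the rewrite author's own statement) =====
-- stated objective: alternative
-- what changed: A's max-value pass plus getKey reverse lookup becomes a single argmax over dict items, and A's per-cell four-running-extrema update becomes a row-wise algorithm: each row is reduced to its first matching column (left-to-right scan) and last matching column (right-to-left scan with early exit), and the bounding box is maintained per row (min of firsts, max of lasts, first/last matching row).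
import Mathlib
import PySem

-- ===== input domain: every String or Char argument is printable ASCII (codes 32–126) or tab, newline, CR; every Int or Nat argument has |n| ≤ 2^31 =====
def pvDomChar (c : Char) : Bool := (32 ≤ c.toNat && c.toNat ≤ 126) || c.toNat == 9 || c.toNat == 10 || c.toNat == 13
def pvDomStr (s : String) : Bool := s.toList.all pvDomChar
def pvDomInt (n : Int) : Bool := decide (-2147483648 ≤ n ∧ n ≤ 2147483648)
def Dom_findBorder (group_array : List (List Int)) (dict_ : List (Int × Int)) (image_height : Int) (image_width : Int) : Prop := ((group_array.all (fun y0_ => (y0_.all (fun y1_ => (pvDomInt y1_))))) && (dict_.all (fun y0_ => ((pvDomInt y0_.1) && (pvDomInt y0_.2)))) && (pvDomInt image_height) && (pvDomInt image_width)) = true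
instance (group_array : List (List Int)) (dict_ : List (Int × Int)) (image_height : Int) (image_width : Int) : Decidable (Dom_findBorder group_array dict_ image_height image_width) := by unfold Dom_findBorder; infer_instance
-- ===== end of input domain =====

-- B replaces A's max-value pass + getKey reverse lookup by one argmax over the dict items, and A's
-- per-cell four-running-extrema scan by a row-wise algorithm: each row is reduced to its first and last
-- matching column and the box is maintained per row (objective: alternative). Return values only; no mutation.

-- dict_[key]: first-match lookup, shared by both ports (the key is always present where either Python
-- evaluates it, so the default 0 is never read)
def pvLk (dict_ : List (Int × Int)) (k : Int) : Int := PySem.Dict.getD (PySem.Dict.mk dict_) k 0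

-- group_array[y][x] == big_group, shared cell expression of both Pythons (the `none` branch is the
-- IndexError case, excluded by Pre_)
def pvMatch (group_array : List (List Int)) (bg : Option Int) (y x : Int) : Bool :=
  match (PySem.List.pyGet? group_array y).bind (fun row => PySem.List.pyGet? row x) with
  | some v => decide (some v = bg)
  | none => false

-- ===== PORT A =====
def getKey (val : Option Int) (dict_ : List (Int × Int)) : Option Int :=
  match dict_ with
  | [] => none
  | (k, v) :: rest => if val = some v then some k else getKey val rest

-- the body of A's `if group_array[y][x] == big_group:` block, step for step
-- (state = (min_x, max_x, min_y, max_y))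
def pvUpdA (y x : Int) (st : Option Int × Option Int × Option Int × Option Int) :
    Option Int × Option Int × Option Int × Option Int :=
  let st := if st.1 = none then (some x, some x, some y, some y) else st
  let st := if st.2.2.2.getD y < y then (st.1, st.2.1, st.2.2.1, some y) else st
  let st := if y < st.2.2.1.getD y then (st.1, st.2.1, some y, st.2.2.2) else st
  let st := if st.2.1.getD x < x then (st.1, some x, st.2.2.1, st.2.2.2) else st
  if x < st.1.getD x then (some x, st.2.1, st.2.2.1, st.2.2.2) else st

-- the body of A's first loop: `if big_num == None: …; if dict_[key] > big_num: …`
-- (big_num is already set when the comparison runs, so the getD default is never read)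
def pvBigStep (dict_ : List (Int × Int)) (bn : Option Int) (k : Int) : Option Int :=
  let bn := if bn = none then some (pvLk dict_ k) else bn
  if bn.getD (pvLk dict_ k) < pvLk dict_ k then some (pvLk dict_ k) else bn

def findBorder (group_array : List (List Int)) (dict_ : List (Int × Int)) (image_height : Int) (image_width : Int) : List (Option Int) :=
  let big_num : Option Int := (dict_.map Prod.fst).foldl (pvBigStep dict_) none
  let big_group := getKey big_num dict_
  let st :=
    (PySem.List.pyRange 0 image_height 1).foldl (fun st y =>
      (PySem.List.pyRange 0 image_width 1).foldl (fun st x =>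
        if pvMatch group_array big_group y x then pvUpdA y x st else st) st)
      ((none, none, none, none) : Option Int × Option Int × Option Int × Option Int)
  [st.1, st.2.1, st.2.2.1, st.2.2.2]

-- ===== PORT B =====
-- one row of Source B's loop: first matching column (forward scan), last matching column (backward scan,
-- default lo is never read), then the four per-row box updates, in Source B's order
def pvRowB (group_array : List (List Int)) (bg : Option Int) (w : Int)
    (st : Option Int × Option Int × Option Int × Option Int) (y : Int) :
    Option Int × Option Int × Option Int × Option Int :=
  match (PySem.List.pyRange 0 w 1).find? (fun x => pvMatch group_array bg y x) with
  | none => st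
  | some lo =>
    let hi := ((PySem.List.pyRange (w - 1) (-1) (-1)).find? (fun x => pvMatch group_array bg y x)).getD lo
    let min_y := if st.2.2.1 = none then some y else st.2.2.1
    let max_y := some y
    let min_x := match st.1 with | none => some lo | some m => if lo < m then some lo else some m
    let max_x := match st.2.1 with | none => some hi | some m => if m < hi then some hi else some m
    (min_x, max_x, min_y, max_y)

def findBorder_alt (group_array : List (List Int)) (dict_ : List (Int × Int)) (image_height : Int) (image_width : Int) : List (Option Int) :=
  let big_group : Option Int :=
    if dict_.isEmpty then none
    else Option.map Prod.fst (PySem.List.max? dict_ (fun kv => kv.2))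
  let st :=
    (PySem.List.pyRange 0 image_height 1).foldl (pvRowB group_array big_group image_width)
      ((none, none, none, none) : Option Int × Option Int × Option Int × Option Int)
  [st.1, st.2.1, st.2.2.1, st.2.2.2]

-- ===== PRECONDITION & SPEC =====
-- Pre_ excludes (i) association lists with duplicate keys, which do not represent any Python dict (the two
-- dict arguments would disagree before either program runs), and (ii) the inputs where A raises IndexError:
-- both loop bounds positive but group_array has fewer than image_height rows or a scanned row shorter than
-- image_width.
def Pre_findBorder (group_array : List (List Int)) (dict_ : List (Int × Int)) (image_height : Int) (image_width : Int) : Prop :=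
  (dict_.map Prod.fst).Nodup ∧
  (0 < image_height → 0 < image_width →
    image_height ≤ (group_array.length : Int) ∧
    ∀ row ∈ group_array.take image_height.toNat, image_width ≤ (row.length : Int))
instance (group_array : List (List Int)) (dict_ : List (Int × Int)) (image_height : Int) (image_width : Int) : Decidable (Pre_findBorder group_array dict_ image_height image_width) := by unfold Pre_findBorder; infer_instance
def pvWitness_findBorder : List (List Int) × (List (Int × Int)) × Int × Int :=
  ([[1, 2], [0, 1]], [(1, 3), (2, 1)], 2, 2)

def Spec_findBorder (group_array : List (List Int)) (dict_ : List (Int × Int)) (image_height : Int) (image_width : Int) (out : List (Option Int)) : Prop := out = findBorder_alt group_array dict_ image_height image_width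
instance (group_array : List (List Int)) (dict_ : List (Int × Int)) (image_height : Int) (image_width : Int) (out : List (Option Int)) : Decidable (Spec_findBorder group_array dict_ image_height image_width out) := by unfold Spec_findBorder; infer_instance

-- ===== CLAIM (what is proved, stated in full; the proofs are below) =====
def Claim_equal_findBorder : Prop := ∀ (group_array : List (List Int)) (dict_ : List (Int × Int)) (image_height : Int) (image_width : Int), Dom_findBorder group_array dict_ image_height image_width → Pre_findBorder group_array dict_ image_height image_width → Spec_findBorder group_array dict_ image_height image_width (findBorder group_array dict_ image_height image_width)

-- ===== LEMMAS AND PROOFS =====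

-- Both scans are shown equal to the bounding box of the gathered matched coordinates:
-- stOf (all matched x's) (all matched y's).

def stOf (xs ys : List Int) : Option Int × Option Int × Option Int × Option Int :=
  (PySem.List.min? xs (fun v => v), PySem.List.max? xs (fun v => v),
   PySem.List.min? ys (fun v => v), PySem.List.max? ys (fun v => v))

-- the flattened lists of matched x- and y-coordinates over the rows of L
def gatherX (P : Int → Int → Bool) (w : Int) (L : List Int) : List Int :=
  L.flatMap (fun y => (PySem.List.pyRange 0 w 1).filter (P y))
def gatherY (P : Int → Int → Bool) (w : Int) (L : List Int) : List Int :=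
  L.flatMap (fun y => ((PySem.List.pyRange 0 w 1).filter (P y)).map (fun _ => y))

-- ----- generic min?/max? facts used by both directions -----

theorem min?_append_singleton (xs : List Int) (x : Int) :
    PySem.List.min? (xs ++ [x]) (fun v => v) =
      match PySem.List.min? xs (fun v => v) with
      | none => some x
      | some m => if x < m then some x else some m := by
  cases hm : PySem.List.min? xs (fun v => v) <;>
    · simp only [PySem.List.min?] at hm ⊢
      rw [List.foldl_append, hm]
      rfl

theorem max?_append_singleton (xs : List Int) (x : Int) :
    PySem.List.max? (xs ++ [x]) (fun v => v) =
      match PySem.List.max? xs (fun v => v) with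
      | none => some x
      | some m => if m < x then some x else some m := by
  cases hm : PySem.List.max? xs (fun v => v) <;>
    · simp only [PySem.List.max?] at hm ⊢
      rw [List.foldl_append, hm]
      rfl

theorem min?_append (xs zs : List Int) :
    PySem.List.min? (xs ++ zs) (fun v => v) =
      match PySem.List.min? xs (fun v => v), PySem.List.min? zs (fun v => v) with
      | none, b => b
      | some a, none => some a
      | some a, some b => some (min a b) := by
  induction zs using List.reverseRecOn with
  | nil =>
    rw [List.append_nil]
    cases h : PySem.List.min? xs (fun v => v) <;> simp [PySem.List.min?]
  | append_singleton t z ih =>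
    rw [← List.append_assoc, min?_append_singleton, min?_append_singleton, ih]
    cases hx : PySem.List.min? xs (fun v => v) <;> cases ht : PySem.List.min? t (fun v => v) <;>
      simp only [] <;> split_ifs <;> simp <;> omega

theorem max?_append (xs zs : List Int) :
    PySem.List.max? (xs ++ zs) (fun v => v) =
      match PySem.List.max? xs (fun v => v), PySem.List.max? zs (fun v => v) with
      | none, b => b
      | some a, none => some a
      | some a, some b => some (max a b) := by
  induction zs using List.reverseRecOn with
  | nil =>
    rw [List.append_nil]
    cases h : PySem.List.max? xs (fun v => v) <;> simp [PySem.List.max?]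
  | append_singleton t z ih =>
    rw [← List.append_assoc, max?_append_singleton, max?_append_singleton, ih]
    cases hx : PySem.List.max? xs (fun v => v) <;> cases ht : PySem.List.max? t (fun v => v) <;>
      simp only [] <;> split_ifs <;> simp <;> omega

theorem foldl_min_of_le (t : List Int) : ∀ a : Int, (∀ b ∈ t, a ≤ b) → t.foldl min a = a := by
  induction t with
  | nil => intro a _; rfl
  | cons c t ih =>
    intro a h
    rw [List.foldl_cons, min_eq_left (h c (by simp))]
    exact ih a (fun b hb => h b (by simp [hb]))

theorem min?_sorted_head (F : List Int) (hF : F.Pairwise (· < ·)) :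
    PySem.List.min? F (fun v => v) = F.head? := by
  cases F with
  | nil => rfl
  | cons a t =>
    rw [PySem.List.min?_id_cons, List.head?_cons,
      foldl_min_of_le t a (fun b hb => le_of_lt ((List.pairwise_cons.mp hF).1 b hb))]

theorem max?_sorted_last (F : List Int) (hF : F.Pairwise (· < ·)) :
    PySem.List.max? F (fun v => v) = F.getLast? := by
  induction F with
  | nil => rfl
  | cons a t ih =>
    cases t with
    | nil => rfl
    | cons b t' =>
      rw [PySem.List.max?_id_cons, List.getLast?_cons_cons, ← ih (List.pairwise_cons.mp hF).2,
        PySem.List.max?_id_cons, List.foldl_cons,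
        max_eq_right (le_of_lt ((List.pairwise_cons.mp hF).1 b (by simp)))]

theorem foldl_max_of_le (t : List Int) : ∀ a : Int, (∀ b ∈ t, b ≤ a) → t.foldl max a = a := by
  induction t with
  | nil => intro a _; rfl
  | cons c t ih =>
    intro a h
    rw [List.foldl_cons, max_eq_left (h c (by simp))]
    exact ih a (fun b hb => h b (by simp [hb]))

theorem min?_const (l : List Int) (y : Int) :
    PySem.List.min? (l.map (fun _ => y)) (fun v => v) = if l.isEmpty then none else some y := by
  cases l with
  | nil => rfl
  | cons a t =>
    have hf : (List.replicate t.length y).foldl min y = y :=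
      foldl_min_of_le _ y (fun b hb => le_of_eq (List.eq_of_mem_replicate hb).symm)
    simp [PySem.List.min?_id_cons, hf]

theorem max?_const (l : List Int) (y : Int) :
    PySem.List.max? (l.map (fun _ => y)) (fun v => v) = if l.isEmpty then none else some y := by
  cases l with
  | nil => rfl
  | cons a t =>
    have hf : (List.replicate t.length y).foldl max y = y :=
      foldl_max_of_le _ y (fun b hb => le_of_eq (List.eq_of_mem_replicate hb))
    simp [PySem.List.max?_id_cons, hf]

-- ----- A's scan = stOf of the gathered coordinates -----

theorem stepA (xs ys : List Int) (x y : Int) (h : xs = [] ↔ ys = []) :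
    pvUpdA y x (stOf xs ys) = stOf (xs ++ [x]) (ys ++ [y]) := by
  rcases eq_or_ne xs [] with hx | hx
  · have hy : ys = [] := h.mp hx
    subst hx; subst hy
    simp [pvUpdA, stOf, PySem.List.min?, PySem.List.max?]
  · have hy : ys ≠ [] := fun h2 => hx (h.mpr h2)
    obtain ⟨mnx, hmnx⟩ := Option.ne_none_iff_exists'.mp
      (fun e => hx ((PySem.List.min?_eq_none_iff xs (fun v : Int => v)).mp e))
    obtain ⟨mxx, hmxx⟩ := Option.ne_none_iff_exists'.mp
      (fun e => hx ((PySem.List.max?_eq_none_iff xs (fun v : Int => v)).mp e))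
    obtain ⟨mny, hmny⟩ := Option.ne_none_iff_exists'.mp
      (fun e => hy ((PySem.List.min?_eq_none_iff ys (fun v : Int => v)).mp e))
    obtain ⟨mxy, hmxy⟩ := Option.ne_none_iff_exists'.mp
      (fun e => hy ((PySem.List.max?_eq_none_iff ys (fun v : Int => v)).mp e))
    simp only [pvUpdA, stOf, hmnx, hmxx, hmny, hmxy, min?_append_singleton, max?_append_singleton,
      Option.getD_some, reduceCtorEq, if_false]
    split_ifs <;> simp_all

theorem innerA (P : Int → Bool) (y : Int) (l : List Int) :
    ∀ (xs ys : List Int), (xs = [] ↔ ys = []) →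
    l.foldl (fun st x => if P x then pvUpdA y x st else st) (stOf xs ys) =
    stOf (xs ++ l.filter P) (ys ++ (l.filter P).map (fun _ => y)) := by
  induction l with
  | nil => intro xs ys _; simp
  | cons a l ih =>
    intro xs ys h
    by_cases hP : P a
    · simp only [List.foldl_cons, hP, if_true, stepA xs ys a y h]
      rw [ih (xs ++ [a]) (ys ++ [y]) (by simp)]
      simp [hP]
    · simp only [List.foldl_cons, hP, Bool.false_eq_true, if_false]
      rw [ih xs ys h]
      simp [hP]

theorem outerA (P : Int → Int → Bool) (w : Int) (L : List Int) :
    ∀ (xs ys : List Int), xs.length = ys.length →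
    L.foldl (fun st y =>
      (PySem.List.pyRange 0 w 1).foldl (fun st x => if P y x then pvUpdA y x st else st) st)
      (stOf xs ys) =
    stOf (xs ++ gatherX P w L) (ys ++ gatherY P w L) := by
  induction L with
  | nil => intro xs ys _; simp [gatherX, gatherY]
  | cons b L ih =>
    intro xs ys hlen
    simp only [List.foldl_cons]
    rw [innerA (P b) b (PySem.List.pyRange 0 w 1) xs ys
      (by
        constructor
        · intro h0; subst h0; exact List.length_eq_zero_iff.mp (by simpa using hlen.symm)
        · intro h0; subst h0; exact List.length_eq_zero_iff.mp (by simpa using hlen))]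
    rw [ih _ _ (by simp [hlen])]
    simp [gatherX, gatherY, List.flatMap_cons]

-- ----- B's row-wise scan = stOf of the same gathered coordinates -----

theorem stepB (ga : List (List Int)) (bg : Option Int) (w y : Int) (xs ys : List Int)
    (hys : ∀ a ∈ ys, a < y) :
    pvRowB ga bg w (stOf xs ys) y =
    stOf (xs ++ (PySem.List.pyRange 0 w 1).filter (fun x => pvMatch ga bg y x))
         (ys ++ ((PySem.List.pyRange 0 w 1).filter (fun x => pvMatch ga bg y x)).map (fun _ => y)) := by
  have hsort : ((PySem.List.pyRange 0 w 1).filter (fun x => pvMatch ga bg y x)).Pairwise (· < ·) :=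
    List.Pairwise.filter _ (PySem.List.pairwise_lt_pyRange_one 0 w)
  have hrev : PySem.List.pyRange (w - 1) (-1) (-1) = (PySem.List.pyRange 0 w 1).reverse := by
    rw [PySem.List.pyRange_neg_one_eq_reverse]; norm_num
  have hfind2 : (PySem.List.pyRange (w - 1) (-1) (-1)).find? (fun x => pvMatch ga bg y x) =
      ((PySem.List.pyRange 0 w 1).filter (fun x => pvMatch ga bg y x)).getLast? := by
    rw [hrev, ← List.head?_filter, List.filter_reverse, List.head?_reverse]
  cases hF : (PySem.List.pyRange 0 w 1).filter (fun x => pvMatch ga bg y x) with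
  | nil =>
    have hfind : (PySem.List.pyRange 0 w 1).find? (fun x => pvMatch ga bg y x) = none := by
      rw [← List.head?_filter, hF]; rfl
    simp [pvRowB, hfind]
  | cons lo rest =>
    have hfind : (PySem.List.pyRange 0 w 1).find? (fun x => pvMatch ga bg y x) = some lo := by
      rw [← List.head?_filter, hF]; rfl
    have hminF : PySem.List.min? (lo :: rest) (fun v => v) = some lo := by
      rw [min?_sorted_head _ (hF ▸ hsort)]; rfl
    simp only [pvRowB, hfind, hfind2, hF]
    obtain ⟨hi, hhi⟩ : ∃ hi, (lo :: rest).getLast? = some hi :=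
      ⟨(lo :: rest).getLast (by simp), List.getLast?_eq_some_getLast (by simp)⟩
    have hmaxF : PySem.List.max? (lo :: rest) (fun v => v) = some hi := by
      rw [max?_sorted_last _ (hF ▸ hsort), hhi]
    simp only [hhi, Option.getD_some]
    have hyconst : ((lo :: rest).map (fun _ => y)).isEmpty = false := by simp
    refine Prod.ext ?_ (Prod.ext ?_ (Prod.ext ?_ ?_)) <;>
      simp only [stOf, min?_append, max?_append, hminF, hmaxF, min?_const, max?_const]
    · cases hxs : PySem.List.min? xs (fun v => v) with
      | none => rfl
      | some m => simp only []; split_ifs <;> (congr 1; omega)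
    · cases hxs : PySem.List.max? xs (fun v => v) with
      | none => rfl
      | some m => simp only []; split_ifs <;> (congr 1; omega)
    · cases hys' : PySem.List.min? ys (fun v => v) with
      | none => rfl
      | some m =>
        have hm : m < y := hys m (PySem.List.min?_mem hys')
        rw [if_neg (by simp)]
        congr 1; omega
    · cases hys' : PySem.List.max? ys (fun v => v) with
      | none => rfl
      | some m =>
        have hm : m < y := hys m (PySem.List.max?_mem hys')
        congr 1; omega

theorem outerB (ga : List (List Int)) (bg : Option Int) (w : Int) (L : List Int) :
    ∀ (xs ys : List Int), L.Pairwise (· < ·) → (∀ a ∈ ys, ∀ b ∈ L, a < b) →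
    L.foldl (pvRowB ga bg w) (stOf xs ys) =
    stOf (xs ++ gatherX (fun y x => pvMatch ga bg y x) w L)
         (ys ++ gatherY (fun y x => pvMatch ga bg y x) w L) := by
  induction L with
  | nil => intro xs ys _ _; simp [gatherX, gatherY]
  | cons b L ih =>
    intro xs ys hpair hyb
    rw [List.foldl_cons, stepB ga bg w b xs ys (fun a ha => hyb a ha b (by simp)),
      ih _ _ (List.pairwise_cons.mp hpair).2 ?later]
    · simp [gatherX, gatherY, List.flatMap_cons]
    · intro a ha b' hb'
      rcases List.mem_append.mp ha with ha | ha
      · exact hyb a ha b' (by simp [hb'])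
      · obtain ⟨x, -, hx⟩ := List.mem_map.mp ha
        have hab : b = a := hx
        subst hab
        exact (List.pairwise_cons.mp hpair).1 b' hb'

-- ----- the big-group computation: A's max-value pass + getKey = B's argmax over items -----

theorem find?_key : ∀ (dict_ : List (Int × Int)), (dict_.map Prod.fst).Nodup →
    ∀ {k v : Int}, (k, v) ∈ dict_ → dict_.find? (fun p => p.1 == k) = some (k, v) := by
  intro dict_
  induction dict_ with
  | nil => intro _ k v hmem; simp at hmem
  | cons p rest ih =>
    intro hnd k v hmem
    rw [List.map_cons, List.nodup_cons] at hnd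
    rcases List.mem_cons.mp hmem with hmem | hmem
    · cases hmem
      simp
    · have hne : p.1 ≠ k := by
        intro he
        exact hnd.1 (by simpa [he] using List.mem_map_of_mem (f := Prod.fst) hmem)
      rw [List.find?_cons_of_neg (by simpa using hne)]
      exact ih hnd.2 hmem

theorem lk_pair (dict_ : List (Int × Int)) (hnd : (dict_.map Prod.fst).Nodup)
    {k v : Int} (hmem : (k, v) ∈ dict_) : pvLk dict_ k = v := by
  simp [pvLk, PySem.Dict.getD, PySem.Dict.get?, find?_key dict_ hnd hmem]

-- proof-side name for the fold body of Python's max(…, key=…)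
def maxStep {α : Type} (f : α → Int) (acc : Option α) (x : α) : Option α :=
  match acc with
  | none => some x
  | some m => if f m < f x then some x else some m

theorem max?_eq_foldl_maxStep {α : Type} (ks : List α) (f : α → Int) :
    PySem.List.max? ks f = ks.foldl (maxStep f) none := by
  rw [PySem.List.max?]
  exact PySem.List.foldl_congr_mem _ _ _ _ (fun acc x _ => by cases acc <;> rfl)

theorem maxStep_map {α β : Type} (f : α → β) (g : α → Int) (g' : β → Int) :
    ∀ (t : List α) (acc : Option α), (∀ x ∈ t, g' (f x) = g x) →
    (∀ a, acc = some a → g' (f a) = g a) →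
    (t.map f).foldl (maxStep g') (Option.map f acc) = Option.map f (t.foldl (maxStep g) acc) := by
  intro t
  induction t with
  | nil => intro acc _ _; rfl
  | cons x t ih =>
    intro acc hmem hacc
    rw [List.map_cons, List.foldl_cons, List.foldl_cons]
    cases acc with
    | none =>
      exact ih (some x) (fun z hz => hmem z (by simp [hz])) (fun a ha => by
        cases ha; exact hmem x (by simp))
    | some a =>
      have hgx : g' (f x) = g x := hmem x (by simp)
      have hga : g' (f a) = g a := hacc a rfl
      show (t.map f).foldl (maxStep g') (maxStep g' (some (f a)) (f x)) = _
      have : maxStep g' (some (f a)) (f x) = Option.map f (maxStep g (some a) x) := by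
        simp only [maxStep, hgx, hga]
        split_ifs <;> rfl
      rw [this]
      exact ih (maxStep g (some a) x) (fun z hz => hmem z (by simp [hz]))
        (fun b hb => by
          simp only [maxStep] at hb
          split_ifs at hb <;> (cases hb; first | exact hmem x (by simp) | exact hacc _ rfl))

theorem fold_map_max? (d : List (Int × Int)) (ks : List Int) :
    ks.foldl (pvBigStep d) none =
    Option.map (fun k => pvLk d k) (PySem.List.max? ks (fun k => pvLk d k)) := by
  rw [max?_eq_foldl_maxStep]
  induction ks using List.reverseRecOn with
  | nil => rfl
  | append_singleton t x ih =>
    rw [List.foldl_append, List.foldl_cons, List.foldl_nil, ih,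
      List.foldl_append, List.foldl_cons, List.foldl_nil]
    cases hm : t.foldl (maxStep (fun k => pvLk d k)) none
    · simp [maxStep, pvBigStep]
    · simp [maxStep, pvBigStep, apply_ite]
      split_ifs <;> omega

theorem max?_keys_items (d : List (Int × Int)) (hnd : (d.map Prod.fst).Nodup) :
    PySem.List.max? (d.map Prod.fst) (fun k => pvLk d k) =
    Option.map Prod.fst (PySem.List.max? d (fun kv => kv.2)) := by
  rw [max?_eq_foldl_maxStep, max?_eq_foldl_maxStep]
  exact maxStep_map Prod.fst (fun kv => kv.2) (fun k => pvLk d k) d none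
    (fun x hx => lk_pair d hnd (by cases x; exact hx)) (fun a ha => by cases ha)

theorem max?_first_aux (f : Int → Int) :
    ∀ (t : List Int) (a m : Int),
    t.foldl (maxStep f) (some a) = some m →
    (∀ k ∈ a :: t, f k ≤ f m) ∧
    ∃ pre suf, a :: t = pre ++ m :: suf ∧ ∀ k ∈ pre, f k < f m := by
  intro t
  induction t with
  | nil =>
    intro a m h
    simp only [List.foldl_nil, Option.some.injEq] at h
    subst h
    exact ⟨by simp, [], [], rfl, by simp⟩
  | cons b t ih =>
    intro a m h
    simp only [List.foldl_cons, maxStep] at h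
    by_cases hab : f a < f b
    · rw [if_pos hab] at h
      obtain ⟨hmax, pre', suf', hsplit, hpre⟩ := ih b m h
      have hbm : f b ≤ f m := hmax b (by simp)
      refine ⟨?_, a :: pre', suf', by rw [List.cons_append, ← hsplit], ?_⟩
      · intro k hk
        rcases List.mem_cons.mp hk with hk | hk
        · subst hk; exact le_of_lt (lt_of_lt_of_le hab hbm)
        · exact hmax k hk
      · intro k hk
        rcases List.mem_cons.mp hk with hk | hk
        · subst hk; exact lt_of_lt_of_le hab hbm
        · exact hpre k hk
    · rw [if_neg hab] at h
      obtain ⟨hmax, pre', suf', hsplit, hpre⟩ := ih a m h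
      have hba : f b ≤ f a := le_of_not_gt hab
      have ham : f a ≤ f m := hmax a (by simp)
      have hmaxall : ∀ k ∈ a :: b :: t, f k ≤ f m := by
        intro k hk
        rcases List.mem_cons.mp hk with hk | hk
        · subst hk; exact ham
        rcases List.mem_cons.mp hk with hk | hk
        · subst hk; exact le_trans hba ham
        · exact hmax k (by simp [hk])
      cases pre' with
      | nil =>
        simp only [List.nil_append, List.cons.injEq] at hsplit
        exact ⟨hmaxall, [], b :: t, by simp [hsplit.1, hsplit.2], by simp⟩
      | cons c pre'' =>
        simp only [List.cons_append, List.cons.injEq] at hsplit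
        obtain ⟨hac, hts⟩ := hsplit
        have ham' : f a < f m := by
          have := hpre c (by simp)
          rwa [← hac] at this
        refine ⟨hmaxall, a :: b :: pre'', suf', by simp [hts], ?_⟩
        intro k hk
        rcases List.mem_cons.mp hk with hk | hk
        · subst hk; exact ham'
        rcases List.mem_cons.mp hk with hk | hk
        · subst hk; exact lt_of_le_of_lt hba ham'
        · exact hpre k (by simp [hk])

theorem max?_first (ks : List Int) (f : Int → Int) (m : Int)
    (h : PySem.List.max? ks f = some m) :
    ∃ pre suf, ks = pre ++ m :: suf ∧ ∀ k ∈ pre, f k < f m := by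
  rw [max?_eq_foldl_maxStep] at h
  cases ks with
  | nil => simp at h
  | cons a t =>
    rw [List.foldl_cons, show maxStep f none a = some a from rfl] at h
    exact (max?_first_aux f t a m h).2

theorem getKey_append (val : Option Int) (d1 d2 : List (Int × Int))
    (h : ∀ p ∈ d1, val ≠ some p.2) :
    getKey val (d1 ++ d2) = getKey val d2 := by
  induction d1 with
  | nil => rfl
  | cons p d1 ih =>
    obtain ⟨pk, pv⟩ := p
    rw [List.cons_append, getKey, if_neg (h (pk, pv) (by simp))]
    exact ih (fun q hq => h q (by simp [hq]))

theorem bg_eq (dict_ : List (Int × Int)) (hnd : (dict_.map Prod.fst).Nodup) :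
    getKey ((dict_.map Prod.fst).foldl (pvBigStep dict_) none) dict_ =
    (if dict_.isEmpty then none
     else Option.map Prod.fst (PySem.List.max? dict_ (fun kv => kv.2))) := by
  rw [fold_map_max?]
  rcases eq_or_ne dict_ [] with hd | hd
  · subst hd; rfl
  · have hne : dict_.map Prod.fst ≠ [] := by simpa using hd
    obtain ⟨km, hkm⟩ := Option.ne_none_iff_exists'.mp
      (fun e => hne ((PySem.List.max?_eq_none_iff (dict_.map Prod.fst) (fun k => pvLk dict_ k)).mp e))
    rw [hkm, if_neg (by simpa [List.isEmpty_iff] using hd), ← max?_keys_items dict_ hnd, hkm]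
    obtain ⟨pre, suf, hsplit, hpre⟩ := max?_first (dict_.map Prod.fst) (fun k => pvLk dict_ k) km hkm
    obtain ⟨d1, rest, hdsplit, hd1, hrest⟩ := List.map_eq_append_iff.mp hsplit
    obtain ⟨a, d2, hrest2, hak, hd2⟩ := List.map_eq_cons_iff.mp hrest
    obtain ⟨ak, av⟩ := a
    simp only at hak
    subst hak
    subst hrest2
    have hav : pvLk dict_ ak = av := lk_pair dict_ hnd (by rw [hdsplit]; simp)
    have hgk : ∀ val : Option Int, (∀ p ∈ d1, val ≠ some p.2) →
        getKey val dict_ = getKey val ((ak, av) :: d2) := by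
      intro val hv
      rw [hdsplit]
      exact getKey_append val d1 _ hv
    rw [hgk _ ?side]
    case side =>
      intro p hp
      have hlkp : pvLk dict_ p.1 = p.2 := by
        obtain ⟨pk, pv⟩ := p
        exact lk_pair dict_ hnd (by rw [hdsplit]; simp [hp])
      have hlt : pvLk dict_ p.1 < pvLk dict_ ak :=
        hpre p.1 (hd1 ▸ List.mem_map_of_mem hp)
      intro he
      have h2 : pvLk dict_ ak = p.2 := by simpa using he
      omega
    simp only [Option.map_some]
    rw [getKey, if_pos (by rw [hav])]

-- ===== VERDICT (by name: the statement is the Claim_ definition above) =====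
theorem findBorder_spec : Claim_equal_findBorder := by
  intro ga d h w _ hpre
  show findBorder ga d h w = findBorder_alt ga d h w
  simp only [findBorder, findBorder_alt]
  rw [bg_eq d hpre.1]
  have e0 : ((none, none, none, none) : Option Int × Option Int × Option Int × Option Int) = stOf [] [] := rfl
  rw [e0,
    outerA (fun y x => pvMatch ga (if d.isEmpty then none
      else Option.map Prod.fst (PySem.List.max? d (fun kv => kv.2))) y x) w
      (PySem.List.pyRange 0 h 1) [] [] rfl,
    outerB ga _ w (PySem.List.pyRange 0 h 1) [] []
      (PySem.List.pairwise_lt_pyRange_one 0 h) (by simp)]
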